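-- pv_equiv track=rewrite | github.com/ChunBoo/JustUK | 294-maxArea.py | bruteForceMethod
-- ===== SOURCE A (Python) =====
-- def bruteForceMethod(length):
--     maxh=1
--     area=0
--     for h in range(1,length//2):
--         if (length-2*h)*h>area:
--             area=(length-2*h)*h
--             maxh=h
--     return area
-- ===== SOURCE B (Python) =====
-- def bruteForceMethod(length):
--     # O(1): the area (length-2h)*h is a concave parabola in h with vertex at length/4;
--     # evaluate it at the two integer candidates around the vertex, clamped to [1, length//2 - 1].
--     if length < 4:
--         return 0
--     hi = length // 2 - 1
--     h1 = min(max(length // 4, 1), hi)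
--     h2 = min(h1 + 1, hi)
--     return max((length - 2 * h1) * h1, (length - 2 * h2) * h2)
-- ===== Notes on version B (the rewrite author's own statement) =====
-- stated objective: faster
-- what changed: Replaces the linear scan over all candidate heights by a closed form: the area is a concave parabola in the height, so B evaluates it only at the two integers around its vertex, clamped to the scanned interval.
import Mathlib
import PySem

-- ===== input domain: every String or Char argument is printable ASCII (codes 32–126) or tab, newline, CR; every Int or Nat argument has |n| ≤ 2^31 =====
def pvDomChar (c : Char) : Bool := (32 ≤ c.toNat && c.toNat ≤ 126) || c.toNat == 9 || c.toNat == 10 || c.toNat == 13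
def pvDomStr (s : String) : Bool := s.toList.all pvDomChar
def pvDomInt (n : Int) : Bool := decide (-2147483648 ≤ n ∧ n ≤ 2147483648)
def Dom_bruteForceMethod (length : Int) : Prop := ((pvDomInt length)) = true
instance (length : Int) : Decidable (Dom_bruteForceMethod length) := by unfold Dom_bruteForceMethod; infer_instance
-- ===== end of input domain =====

-- B replaces A's linear scan by an O(1) evaluation of the parabola at its vertex (clamped); return value only.
-- ===== PORT A =====
def bruteForceMethod (length : Int) : Int :=
  ((PySem.List.pyRange 1 (PySem.Int.floordiv length 2) 1).foldl
    (fun (st : Int × Int) h =>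
      if (length - 2 * h) * h > st.2 then (h, (length - 2 * h) * h) else st)
    (1, 0)).2

-- ===== PORT B =====
def bruteForceMethod_alt (length : Int) : Int :=
  if length < 4 then 0
  else
    let hi := PySem.Int.floordiv length 2 - 1
    let h1 := min (max (PySem.Int.floordiv length 4) 1) hi
    let h2 := min (h1 + 1) hi
    max ((length - 2 * h1) * h1) ((length - 2 * h2) * h2)

-- ===== PRECONDITION & SPEC =====
def Spec_bruteForceMethod (length : Int) (out : Int) : Prop := out = bruteForceMethod_alt length
instance (length : Int) (out : Int) : Decidable (Spec_bruteForceMethod length out) := by unfold Spec_bruteForceMethod; infer_instance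

-- ===== CLAIM (what is proved, stated in full; the proofs are below) =====
def Claim_equal_bruteForceMethod : Prop := ∀ (length : Int), Dom_bruteForceMethod length → Spec_bruteForceMethod length (bruteForceMethod length)

-- ===== LEMMAS AND PROOFS =====

-- ===== VERDICT (by name: the statement is the Claim_ definition above) =====
-- the loop's area component is a fold of max
theorem fold_snd (L : Int) (l : List Int) (m a : Int) :
    ((l.foldl (fun (st : Int × Int) h =>
        if (L - 2 * h) * h > st.2 then (h, (L - 2 * h) * h) else st) (m, a)).2)
      = l.foldl (fun acc h => max acc ((L - 2 * h) * h)) a := by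
  induction l generalizing m a with
  | nil => rfl
  | cons x xs ih =>
      simp only [List.foldl]
      split_ifs with h
      · rw [ih, max_eq_right (le_of_lt h)]
      · rw [ih, max_eq_left (by omega)]

theorem foldmax_ge_init (f : Int → Int) (l : List Int) (a : Int) :
    a ≤ l.foldl (fun acc h => max acc (f h)) a := by
  induction l generalizing a with
  | nil => simp
  | cons x xs ih => exact le_trans (le_max_left a (f x)) (ih _)

theorem foldmax_ge_mem (f : Int → Int) (l : List Int) (a x : Int) (hx : x ∈ l) :
    f x ≤ l.foldl (fun acc h => max acc (f h)) a := by
  induction hx generalizing a with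
  | head ys => exact le_trans (le_max_right a (f x)) (foldmax_ge_init f ys _)
  | tail y hmem ih => exact ih _

theorem foldmax_mem (f : Int → Int) (l : List Int) (a : Int) :
    l.foldl (fun acc h => max acc (f h)) a = a ∨
      ∃ x ∈ l, l.foldl (fun acc h => max acc (f h)) a = f x := by
  induction l generalizing a with
  | nil => exact Or.inl rfl
  | cons y ys ih =>
      rcases ih (max a (f y)) with h | ⟨x, hx, hfx⟩
      · rcases max_choice a (f y) with hm | hm
        · exact Or.inl (by simpa [hm] using h)
        · exact Or.inr ⟨y, List.mem_cons_self .., by simpa [hm] using h⟩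
      · exact Or.inr ⟨x, List.mem_cons_of_mem _ hx, hfx⟩

theorem bruteForceMethod_spec : Claim_equal_bruteForceMethod := by
  intro L _
  unfold Spec_bruteForceMethod bruteForceMethod bruteForceMethod_alt
  rw [fold_snd]
  set f : Int → Int := fun h => (L - 2 * h) * h with hf
  by_cases h4 : L < 4
  · have h2 : PySem.Int.floordiv L 2 ≤ 1 := by
      rw [PySem.Int.floordiv_eq_ediv_of_pos (by omega)]; omega
    rw [PySem.List.pyRange_one_eq_nil h2]
    simp [h4]
  · have hk2 : PySem.Int.floordiv L 2 = L / 2 :=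
      PySem.Int.floordiv_eq_ediv_of_pos (by omega)
    have hk4 : PySem.Int.floordiv L 4 = L / 4 :=
      PySem.Int.floordiv_eq_ediv_of_pos (by omega)
    set k := PySem.Int.floordiv L 2 with hk
    set q := PySem.Int.floordiv L 4 with hq
    have hkb : 2 * k ≤ L ∧ L < 2 * k + 2 := by omega
    have hqb : 4 * q ≤ L ∧ L < 4 * q + 4 := by omega
    have hq1 : 1 ≤ q := by omega
    have hqk : q ≤ k - 1 := by omega
    have hh1 : min (max q 1) (k - 1) = q := by omega
    rw [if_neg h4]
    simp only [hh1]
    set h2 := min (q + 1) (k - 1) with hh2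
    -- every scanned h is dominated by one of the two candidates
    have hub : ∀ x ∈ PySem.List.pyRange 1 k 1, f x ≤ max (f q) (f h2) := by
      intro x hx
      rw [PySem.List.mem_pyRange_one] at hx
      by_cases hxq : x ≤ q
      · refine le_trans ?_ (le_max_left _ _)
        have : f q - f x = (q - x) * (L - 2 * (q + x)) := by simp only [hf]; ring
        nlinarith [mul_nonneg (show (0:Int) ≤ q - x by omega)
          (show (0:Int) ≤ L - 2 * (q + x) by omega)]
      · have hx2 : h2 = q + 1 := by omega
        refine le_trans ?_ (le_max_right _ _)
        rw [hx2]
        have : f (q + 1) - f x = (x - (q + 1)) * (2 * ((q + 1) + x) - L) := by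
          simp only [hf]; ring
        nlinarith [mul_nonneg (show (0:Int) ≤ x - (q + 1) by omega)
          (show (0:Int) ≤ 2 * ((q + 1) + x) - L by omega)]
    have hfq_pos : 0 < f q := by
      have : f q = (L - 2 * q) * q := rfl
      nlinarith [mul_pos (show (0:Int) < L - 2 * q by omega) (show (0:Int) < q by omega)]
    have hmemq : q ∈ PySem.List.pyRange 1 k 1 :=
      (PySem.List.mem_pyRange_one).2 ⟨by omega, by omega⟩
    have hmemh2 : h2 ∈ PySem.List.pyRange 1 k 1 :=
      (PySem.List.mem_pyRange_one).2 ⟨by omega, by omega⟩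
    refine le_antisymm ?_ ?_
    · rcases foldmax_mem f (PySem.List.pyRange 1 k 1) 0 with h0 | ⟨x, hx, hfx⟩
      · rw [h0]; exact le_trans (le_of_lt hfq_pos) (le_max_left _ _)
      · rw [hfx]; exact hub x hx
    · exact max_le (foldmax_ge_mem f _ 0 q hmemq) (foldmax_ge_mem f _ 0 h2 hmemh2)
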